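-- pv_equiv track=rewrite | github.com/SushaanthSrinivasan/TensorDraw | helpers.py | consecutive_count
-- ===== SOURCE A (Python) =====
-- def consecutive_count(arr):
--     consecutive_groups = []
--     start_index = None
--     count = 0
--
--     for i, num in enumerate(arr):
--         if start_index is None:
--             start_index = i
--             count = 1
--         elif num == arr[i - 1] + 1:
--             count += 1
--         else:
--             consecutive_groups.append((start_index, count))
--             start_index = i
--             count = 1
--
--     if start_index is not None:
--         consecutive_groups.append((start_index, count))
--
--     return consecutive_groups
-- ===== SOURCE B (Python) =====
-- def consecutive_count(arr):
--     starts = [i for i in range(len(arr)) if i == 0 or arr[i] != arr[i - 1] + 1]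
--     starts.append(len(arr))
--     return [(s, e - s) for s, e in zip(starts, starts[1:])]
-- ===== Notes on version B (the rewrite author's own statement) =====
-- stated objective: alternative
-- what changed: Replaces A's single stateful scan with (start,count) accumulator variables by a two-phase boundary decomposition: a comprehension collects run-start indices plus a len(arr) sentinel, and counts are derived by zipping adjacent boundaries and taking gaps.
import Mathlib
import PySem

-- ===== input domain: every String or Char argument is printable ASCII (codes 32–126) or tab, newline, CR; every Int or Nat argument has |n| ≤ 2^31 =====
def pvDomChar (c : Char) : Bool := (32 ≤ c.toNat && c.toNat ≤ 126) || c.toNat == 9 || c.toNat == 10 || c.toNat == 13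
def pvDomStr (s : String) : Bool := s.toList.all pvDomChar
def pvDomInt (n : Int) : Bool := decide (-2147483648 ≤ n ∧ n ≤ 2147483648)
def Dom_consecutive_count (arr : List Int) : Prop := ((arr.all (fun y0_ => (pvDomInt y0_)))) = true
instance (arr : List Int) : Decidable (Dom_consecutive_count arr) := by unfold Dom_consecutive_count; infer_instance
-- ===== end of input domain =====

-- B replaces A's stateful accumulator scan by a boundary-index comprehension plus a zip of
-- adjacent boundaries (objective: alternative decomposition, same O(n) cost).

-- ===== PORT A =====
-- loop body of A's for-loop over enumerate(arr); arr[i-1] is only read when i ≥ 1, so it is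
-- always in range and pyGetD is exact there
def stepA (arr : List Int) (st : List (Int × Int) × Option Int × Int) (p : Int × Int) :
    List (Int × Int) × Option Int × Int :=
  match st.2.1 with
  | none => (st.1, some p.1, 1)
  | some s =>
    if p.2 = PySem.List.pyGetD arr (p.1 - 1) 0 + 1 then (st.1, some s, st.2.2 + 1)
    else (st.1 ++ [(s, st.2.2)], some p.1, 1)

def consecutive_count (arr : List Int) : List (Int × Int) :=
  let st := (PySem.List.enumerate arr 0).foldl (stepA arr) ([], none, 0)
  match st.2.1 with
  | none => st.1
  | some s => st.1 ++ [(s, st.2.2)]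

-- ===== PORT B =====
-- the run-start test of Source B's comprehension; indices i and i-1 are always in range
def startB (arr : List Int) (i : Int) : Bool :=
  i == 0 || !(PySem.List.pyGetD arr i 0 == PySem.List.pyGetD arr (i - 1) 0 + 1)

def consecutive_count_alt (arr : List Int) : List (Int × Int) :=
  let starts0 := (PySem.List.pyRange 0 arr.length 1).filter (startB arr)
  let starts := starts0 ++ [(arr.length : Int)]
  List.zipWith (fun s e => (s, e - s)) starts (PySem.List.slice starts (some 1) none)

-- ===== PRECONDITION & SPEC =====
def Spec_consecutive_count (arr : List Int) (out : List (Int × Int)) : Prop := out = consecutive_count_alt arr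
instance (arr : List Int) (out : List (Int × Int)) : Decidable (Spec_consecutive_count arr out) := by unfold Spec_consecutive_count; infer_instance

-- ===== CLAIM (what is proved, stated in full; the proofs are below) =====
def Claim_equal_consecutive_count : Prop := ∀ (arr : List Int), Dom_consecutive_count arr → Spec_consecutive_count arr (consecutive_count arr)

-- ===== LEMMAS AND PROOFS =====

-- reference recursion: state (prev element, run start, run count); returns (finished groups, final start, final count)
def goA (prev s c : Int) : List Int → List (Int × Int) × Int × Int
  | [] => ([], s, c)
  | y :: ys =>
    if y = prev + 1 then goA y s (c + 1) ys
    else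
      let r := goA y (s + c) 1 ys
      ((s, c) :: r.1, r.2)

lemma drop_eq_cons_getD {arr : List Int} {k : Nat} {prev : Int} {ys : List Int}
    (h : arr.drop k = prev :: ys) : arr.getD k 0 = prev := by
  simp [List.getD_eq_getElem?_getD, ← List.head?_drop, h]

lemma drop_tail_cons {arr : List Int} {k : Nat} {prev y : Int} {ys : List Int}
    (hk : 1 ≤ k) (h : arr.drop (k - 1) = prev :: y :: ys) : arr.drop k = y :: ys := by
  have hk' : k = (k - 1) + 1 := by omega
  rw [hk', ← List.tail_drop, h]
  rfl

lemma pyGetD_pred {arr : List Int} {k : Nat} {prev : Int} {ys : List Int}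
    (hk : 1 ≤ k) (h : arr.drop (k - 1) = prev :: ys) :
    PySem.List.pyGetD arr ((k : Int) - 1) 0 = prev := by
  have hc : ((k : Int) - 1) = ((k - 1 : Nat) : Int) := by omega
  rw [hc, PySem.List.pyGetD_natCast]
  exact drop_eq_cons_getD h

lemma A_loop (arr : List Int) : ∀ (ys : List Int) (k : Nat) (prev s c : Int)
    (groups : List (Int × Int)), 1 ≤ k → arr.drop (k - 1) = prev :: ys → s + c = (k : Int) →
    (PySem.List.enumerate ys (k : Int)).foldl (stepA arr) (groups, some s, c)
      = (groups ++ (goA prev s c ys).1, some (goA prev s c ys).2.1, (goA prev s c ys).2.2) := by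
  intro ys
  induction ys with
  | nil => intro k prev s c groups hk hd hsc; simp [PySem.List.enumerate, goA]
  | cons y ys ih =>
    intro k prev s c groups hk hd hsc
    have hdk : arr.drop k = y :: ys := drop_tail_cons hk hd
    have hprev := pyGetD_pred hk hd
    have hcast : ((k : Int) + 1) = ((k + 1 : Nat) : Int) := by push_cast; ring
    rw [PySem.List.enumerate_cons]
    simp only [List.foldl_cons, stepA]
    rw [hprev, hcast]
    by_cases hy : y = prev + 1
    · rw [if_pos hy, goA, if_pos hy]
      exact ih (k + 1) y s (c + 1) groups (by omega) (by simpa using hdk) (by push_cast; omega)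
    · rw [if_neg hy, goA, if_neg hy]
      have h2 := ih (k + 1) y (k : Int) 1 (groups ++ [(s, c)]) (by omega)
        (by simpa using hdk) (by push_cast; omega)
      rw [hsc]
      simpa [List.append_assoc] using h2

lemma A_char (arr : List Int) : consecutive_count arr
    = match arr with
      | [] => []
      | x :: xs => (goA x 0 1 xs).1 ++ [((goA x 0 1 xs).2.1, (goA x 0 1 xs).2.2)] := by
  cases arr with
  | nil => simp [consecutive_count, PySem.List.enumerate]
  | cons x xs =>
    show consecutive_count (x :: xs) = _
    unfold consecutive_count
    rw [PySem.List.enumerate_cons]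
    simp only [List.foldl_cons, stepA]
    rw [show ((0 : Int) + 1) = ((1 : Nat) : Int) by norm_num]
    rw [A_loop (x :: xs) xs 1 x 0 1 [] (by omega) (by simp) (by norm_num)]
    simp

lemma B_loop (arr : List Int) : ∀ (ys : List Int) (k : Nat) (prev s c : Int),
    1 ≤ k → arr.drop (k - 1) = prev :: ys → s + c = (k : Int) →
    List.zipWith (fun s e => (s, e - s))
        (s :: ((PySem.List.pyRange (k : Int) arr.length 1).filter (startB arr) ++ [(arr.length : Int)]))
        ((PySem.List.pyRange (k : Int) arr.length 1).filter (startB arr) ++ [(arr.length : Int)])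
      = (goA prev s c ys).1 ++ [((goA prev s c ys).2.1, (goA prev s c ys).2.2)] := by
  intro ys
  induction ys with
  | nil =>
    intro k prev s c hk hd hsc
    have hlen : arr.length = k := by
      have := congrArg List.length hd
      simp [List.length_drop] at this
      omega
    rw [hlen, PySem.List.pyRange_one_eq_nil (le_refl _)]
    simp [goA]
    omega
  | cons y ys ih =>
    intro k prev s c hk hd hsc
    have hklt : k < arr.length := by
      have := congrArg List.length hd
      simp [List.length_drop] at this
      omega
    have hdk : arr.drop k = y :: ys := drop_tail_cons hk hd
    have hprev := pyGetD_pred hk hd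
    have hcur : PySem.List.pyGetD arr (k : Int) 0 = y := by
      rw [PySem.List.pyGetD_natCast]
      exact drop_eq_cons_getD hdk
    have hcast : ((k : Int) + 1) = ((k + 1 : Nat) : Int) := by push_cast; ring
    rw [PySem.List.pyRange_one_cons (by exact_mod_cast hklt), hcast]
    have h2 := ih (k + 1) y (if y = prev + 1 then s else (k : Int))
      (if y = prev + 1 then c + 1 else 1) (by omega) (by simpa using hdk)
      (by split_ifs <;> push_cast <;> omega)
    by_cases hy : y = prev + 1
    · have hp : startB arr (k : Int) = false := by
        simp [startB, hcur, hprev, hy]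
        omega
      rw [List.filter_cons_of_neg (by simp [hp]), goA, if_pos hy]
      simpa [hy] using h2
    · have hp : startB arr (k : Int) = true := by
        simp [startB, hcur, hprev]
        exact Or.inr hy
      rw [List.filter_cons_of_pos hp, goA, if_neg hy]
      simp only [hy, if_false] at h2
      simp only [List.cons_append, List.zipWith_cons_cons] at h2 ⊢
      rw [h2, hsc]
      have hks : (k : Int) - s = c := by omega
      simp [hks]

lemma B_char (arr : List Int) : consecutive_count_alt arr
    = match arr with
      | [] => []
      | x :: xs => (goA x 0 1 xs).1 ++ [((goA x 0 1 xs).2.1, (goA x 0 1 xs).2.2)] := by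
  cases arr with
  | nil =>
    simp [consecutive_count_alt, PySem.List.pyRange_one_eq_nil, PySem.List.slice_from_one]
  | cons x xs =>
    show consecutive_count_alt (x :: xs) = _
    simp only [consecutive_count_alt]
    rw [PySem.List.slice_from_one]
    rw [show ((0 : Int)) = ((0 : Nat) : Int) by norm_num,
      PySem.List.pyRange_one_cons (by exact_mod_cast Nat.succ_pos xs.length)]
    rw [List.filter_cons_of_pos (by simp [startB])]
    rw [show ((0 : Nat) : Int) + 1 = ((1 : Nat) : Int) by norm_num]
    have := B_loop (x :: xs) xs 1 x 0 1 (by omega) (by simp) (by norm_num)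
    simpa using this

-- ===== VERDICT (by name: the statement is the Claim_ definition above) =====
theorem consecutive_count_spec : Claim_equal_consecutive_count := by
  intro arr _
  unfold Spec_consecutive_count
  rw [A_char, B_char]
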